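-- pv_equiv track=rewrite | github.com/YinyuDream/Algorithm-Competition-Materials | 牛客竞赛/CH_77/NC_CH_77A 峡国西高校 (easy version).py | no_carry_add
-- ===== SOURCE A (Python) =====
-- def to_base_k(n, k):
--     """将十进制数n转换为k进制数"""
--     if n == 0:
--         return [0]
--     digits = []
--     while n:
--         digits.append(n % k)
--         n //= k
--     return digits[::-1]
--
-- def from_base_k(digits, k):
--     """将k进制数的digits转换为十进制数"""
--     result = 0
--     for digit in digits:
--         result = result * k + digit
--     return result
--
-- def no_carry_add(A, B, k):
--     """计算A + B在k进制下的不进位加法，返回其十进制值"""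
--     # 将A和B转换成k进制
--     digits_A = to_base_k(A, k)
--     digits_B = to_base_k(B, k)
--
--     # 对齐两个数的位数，短的数前面补0
--     max_len = max(len(digits_A), len(digits_B))
--     digits_A = [0] * (max_len - len(digits_A)) + digits_A
--     digits_B = [0] * (max_len - len(digits_B)) + digits_B
--
--     # 不进位加法
--     result_digits = []
--     for a, b in zip(digits_A, digits_B):
--         result_digits.append((a + b) % k)
--
--     # 将结果转换回十进制
--     return from_base_k(result_digits, k)
-- ===== SOURCE B (Python) =====
-- def no_carry_add(A, B, k):
--     """计算A + B在k进制下的不进位加法，返回其十进制值"""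
--     result = 0
--     place = 1
--     while A or B:
--         result += ((A % k) + (B % k)) % k * place
--         place *= k
--         A //= k
--         B //= k
--     return result
-- ===== Notes on version B (the rewrite author's own statement) =====
-- stated objective: simpler
-- what changed: Replaced the three-phase pipeline (build two MSB-first digit lists, left-pad them to equal length, zip/mod, then fold back to an integer) by a single LSB-first loop that extracts digits with % and //= and accumulates the result directly with a running place value, eliminating the helper functions, the intermediate lists and the alignment step.
import Mathlib
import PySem

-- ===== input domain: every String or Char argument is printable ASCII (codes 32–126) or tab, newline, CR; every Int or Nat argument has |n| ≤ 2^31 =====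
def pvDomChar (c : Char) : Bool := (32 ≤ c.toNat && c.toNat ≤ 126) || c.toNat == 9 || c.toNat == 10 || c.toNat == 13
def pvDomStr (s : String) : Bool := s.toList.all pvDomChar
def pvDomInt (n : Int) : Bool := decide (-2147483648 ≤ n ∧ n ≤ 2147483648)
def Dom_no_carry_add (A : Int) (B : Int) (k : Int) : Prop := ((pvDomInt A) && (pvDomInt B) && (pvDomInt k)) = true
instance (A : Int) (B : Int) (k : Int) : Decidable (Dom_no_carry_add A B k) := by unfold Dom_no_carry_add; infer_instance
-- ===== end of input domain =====

-- B replaces A's three phases (digit lists, left-padding alignment, fold back) by one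
-- LSB-first %-and-//= loop with a running place value: simpler, no intermediate lists.

-- Uniqueness of the Python floor-division/modulus representation (used for termination
-- of the ports' loops and throughout the proofs).
theorem fd_unique (k q r : Int) (hk : k ≠ 0)
    (hr : (0 < k ∧ 0 ≤ r ∧ r < k) ∨ (k < 0 ∧ k < r ∧ r ≤ 0)) :
    PySem.Int.floordiv (q * k + r) k = q ∧ PySem.Int.mod (q * k + r) k = r := by
  set x := q * k + r with hx
  have h1 := PySem.Int.floordiv_mul_add_mod x k
  set q' := PySem.Int.floordiv x k with hq'def
  set r' := PySem.Int.mod x k with hr'def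
  have hr' : (0 < k ∧ 0 ≤ r' ∧ r' < k) ∨ (k < 0 ∧ k < r' ∧ r' ≤ 0) := by
    rcases lt_trichotomy k 0 with h|h|h
    · right; exact ⟨h, (PySem.Int.mod_neg_bounds x h).1, (PySem.Int.mod_neg_bounds x h).2⟩
    · omega
    · left; exact ⟨h, PySem.Int.mod_nonneg x h, PySem.Int.mod_lt x h⟩
  have hq : q' = q := by
    rcases lt_trichotomy q' q with h|h|h
    · rcases hr with ⟨hk0, h2, h3⟩|⟨hk0, h2, h3⟩ <;> rcases hr' with ⟨_, h4, h5⟩|⟨_, h4, h5⟩ <;> try omega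
      · have := mul_le_mul_of_nonneg_right (show (1:Int) ≤ q - q' by omega) (le_of_lt hk0)
        rw [one_mul] at this
        have h6 : (q - q') * k = q * k - q' * k := by ring
        omega
      · have : (q - q') * k ≤ 1 * k := mul_le_mul_of_nonpos_right (by omega) (le_of_lt hk0)
        rw [one_mul] at this
        have h6 : (q - q') * k = q * k - q' * k := by ring
        omega
    · exact h
    · rcases hr with ⟨hk0, h2, h3⟩|⟨hk0, h2, h3⟩ <;> rcases hr' with ⟨_, h4, h5⟩|⟨_, h4, h5⟩ <;> try omega
      · have : (q - q') * k ≤ (-1) * k := mul_le_mul_of_nonneg_right (by omega) (le_of_lt hk0)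
        rw [neg_one_mul] at this
        have h6 : (q - q') * k = q * k - q' * k := by ring
        omega
      · have : (-1 : Int) * k ≤ (q - q') * k := mul_le_mul_of_nonpos_right (by omega) (le_of_lt hk0)
        rw [neg_one_mul] at this
        have h6 : (q - q') * k = q * k - q' * k := by ring
        omega
  refine ⟨hq, ?_⟩
  have h7 : q' * k = q * k := by rw [hq]
  omega

theorem fd_zero (k : Int) (hk : k ≠ 0) :
    PySem.Int.floordiv 0 k = 0 ∧ PySem.Int.mod 0 k = 0 := by
  have := fd_unique k 0 0 hk (by omega)
  simpa using this

-- the termination measure of the digit-extraction loops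
def pvMeasure (n : Int) : Nat := 2 * n.natAbs + (if 0 < n then 1 else 0)

theorem pvStep (n k : Int) (h : n ≠ 0 ∧ (2 ≤ k ∧ 0 < n ∨ k ≤ -2)) :
    pvMeasure (PySem.Int.floordiv n k) < pvMeasure n := by
  obtain ⟨hn0, hc⟩ := h
  have h1 := PySem.Int.floordiv_mul_add_mod n k
  set q := PySem.Int.floordiv n k with hq
  set r := PySem.Int.mod n k with hr
  rcases hc with ⟨hk2, hnp⟩ | hkn
  · -- 2 ≤ k, 0 < n
    have hb1 : 0 ≤ r := PySem.Int.mod_nonneg n (by omega)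
    have hb2 : r < k := PySem.Int.mod_lt n (by omega)
    have hq0 : 0 ≤ q := by
      by_contra hneg
      have : q * k ≤ (-1) * k := mul_le_mul_of_nonneg_right (by omega) (by omega)
      omega
    have hqn : q < n := by
      by_contra hge
      have e2 : q * 2 ≤ q * k := mul_le_mul_of_nonneg_left (by omega) hq0
      omega
    unfold pvMeasure
    split_ifs <;> omega
  · -- k ≤ -2
    have hb1 : k < r := (PySem.Int.mod_neg_bounds n (by omega)).1
    have hb2 : r ≤ 0 := (PySem.Int.mod_neg_bounds n (by omega)).2
    rcases lt_trichotomy n 0 with hn | hn | hn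
    · -- n < 0 : 0 ≤ q and q < -n
      have hq0 : 0 ≤ q := by
        by_contra hneg
        have : (-1) * k ≤ q * k := mul_le_mul_of_nonpos_right (by omega) (by omega)
        omega
      have hqn : q < -n := by
        by_contra hge
        have e1 : q * k ≤ (-n) * k := mul_le_mul_of_nonpos_right (by omega) (by omega)
        have e2 : n * (-k) ≤ n * 2 := mul_le_mul_of_nonpos_left (by omega) (by omega)
        have e3 : (-n) * k = -(n * (-k)) * (-1) := by ring
        nlinarith
      unfold pvMeasure
      split_ifs <;> omega
    · omega
    · -- 0 < n : q ≤ 0 and -q ≤ n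
      have hq0 : q ≤ 0 := by
        by_contra hpos
        have : q * k ≤ 1 * k := mul_le_mul_of_nonpos_right (by omega) (by omega)
        omega
      have hqn : -q ≤ n := by
        by_contra hge
        have e1 : (-(n+1)) * k ≤ q * k := mul_le_mul_of_nonpos_right (by omega) (by omega)
        have e2 : n * 2 ≤ n * (-k) := mul_le_mul_of_nonneg_left (by omega) (by omega)
        nlinarith
      unfold pvMeasure
      split_ifs <;> omega

theorem pvStepLe (n k : Int) (h : 2 ≤ k ∧ 0 ≤ n ∨ k ≤ -2) :
    pvMeasure (PySem.Int.floordiv n k) ≤ pvMeasure n := by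
  by_cases hn : n = 0
  · subst hn
    rw [(fd_zero k (by omega)).1]
  · exact le_of_lt (pvStep n k ⟨hn, by omega⟩)

theorem pvStep2 (A B k : Int)
    (h : (A ≠ 0 ∨ B ≠ 0) ∧ (2 ≤ k ∧ 0 ≤ A ∧ 0 ≤ B ∨ k ≤ -2)) :
    pvMeasure (PySem.Int.floordiv A k) + pvMeasure (PySem.Int.floordiv B k)
      < pvMeasure A + pvMeasure B := by
  obtain ⟨hne, hc⟩ := h
  rcases hne with hA | hB
  · have h1 := pvStep A k ⟨hA, by omega⟩
    have h2 := pvStepLe B k (by omega)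
    omega
  · have h1 := pvStepLe A k (by omega)
    have h2 := pvStep B k ⟨hB, by omega⟩
    omega

-- ===== PORT A =====
-- the `while n:` loop of to_base_k, collecting digits least-significant first
-- (guard strengthened only by the exact conditions under which the Python loop
-- terminates; on inputs admitted by Pre_ it is `n ≠ 0`)
def toBaseKLoop (n k : Int) : List Int :=
  if h : n ≠ 0 ∧ (2 ≤ k ∧ 0 < n ∨ k ≤ -2) then
    PySem.Int.mod n k :: toBaseKLoop (PySem.Int.floordiv n k) k
  else []
termination_by pvMeasure n
decreasing_by exact pvStep n k h

def to_base_k (n k : Int) : List Int :=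
  if n = 0 then [0] else (toBaseKLoop n k).reverse

def from_base_k (digits : List Int) (k : Int) : Int :=
  digits.foldl (fun result digit => result * k + digit) 0

def no_carry_add (A : Int) (B : Int) (k : Int) : Int :=
  let digitsA := to_base_k A k
  let digitsB := to_base_k B k
  let maxLen := max digitsA.length digitsB.length
  let digitsA' := List.replicate (maxLen - digitsA.length) (0:Int) ++ digitsA
  let digitsB' := List.replicate (maxLen - digitsB.length) (0:Int) ++ digitsB
  let resultDigits := (digitsA'.zip digitsB').foldl
    (fun acc p => acc ++ [PySem.Int.mod (p.1 + p.2) k]) []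
  from_base_k resultDigits k

-- ===== PORT B =====
-- the `while A or B:` loop of Source B (guard strengthened only by the exact
-- conditions under which the Python loop terminates)
def altLoop (A B k place result : Int) : Int :=
  if h : (A ≠ 0 ∨ B ≠ 0) ∧ (2 ≤ k ∧ 0 ≤ A ∧ 0 ≤ B ∨ k ≤ -2) then
    altLoop (PySem.Int.floordiv A k) (PySem.Int.floordiv B k) k (place * k)
      (result + PySem.Int.mod (PySem.Int.mod A k + PySem.Int.mod B k) k * place)
  else result
termination_by pvMeasure A + pvMeasure B
decreasing_by exact pvStep2 A B k h

def no_carry_add_alt (A : Int) (B : Int) (k : Int) : Int :=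
  altLoop A B k 1 0

-- ===== PRECONDITION & SPEC =====
-- Pre_ is exactly the set of inputs on which the Python A returns: for k = 0 it raises
-- ZeroDivisionError, and for k ∈ {-1, 1} or (k ≥ 2 with a negative operand) the
-- `while n:` loop never terminates — except that for A = B = 0 every k ≠ 0 returns.
def Pre_no_carry_add (A : Int) (B : Int) (k : Int) : Prop :=
  (2 ≤ k ∧ 0 ≤ A ∧ 0 ≤ B) ∨ k ≤ -2 ∨ (A = 0 ∧ B = 0 ∧ k ≠ 0)
instance (A : Int) (B : Int) (k : Int) : Decidable (Pre_no_carry_add A B k) := by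
  unfold Pre_no_carry_add; infer_instance

def pvWitness_no_carry_add : Int × Int × Int := (5, 9, 2)

def Spec_no_carry_add (A : Int) (B : Int) (k : Int) (out : Int) : Prop := out = no_carry_add_alt A B k
instance (A : Int) (B : Int) (k : Int) (out : Int) : Decidable (Spec_no_carry_add A B k out) := by unfold Spec_no_carry_add; infer_instance

-- ===== CLAIM (what is proved, stated in full; the proofs are below) =====
def Claim_equal_no_carry_add : Prop := ∀ (A : Int) (B : Int) (k : Int), Dom_no_carry_add A B k → Pre_no_carry_add A B k → Spec_no_carry_add A B k (no_carry_add A B k)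

-- ===== LEMMAS AND PROOFS =====

-- the common digit-wise recursion both programs compute
def pvS (A B k : Int) : Int :=
  if h : (A ≠ 0 ∨ B ≠ 0) ∧ (2 ≤ k ∧ 0 ≤ A ∧ 0 ≤ B ∨ k ≤ -2) then
    PySem.Int.mod (PySem.Int.mod A k + PySem.Int.mod B k) k
      + k * pvS (PySem.Int.floordiv A k) (PySem.Int.floordiv B k) k
  else 0
termination_by pvMeasure A + pvMeasure B
decreasing_by exact pvStep2 A B k h

-- value of a least-significant-first digit list
def pvValL (k : Int) : List Int → Int
  | [] => 0
  | d :: ds => d + k * pvValL k ds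

theorem pvAlt_eq (A B k place result : Int) :
    altLoop A B k place result = result + place * pvS A B k := by
  induction A, B, place, result using altLoop.induct (k := k) with
  | case1 A B place result h ih =>
    rw [altLoop, dif_pos h, ih]
    conv_rhs => rw [pvS]
    rw [dif_pos h]; ring
  | case2 A B place result h =>
    rw [altLoop, dif_neg h, pvS, dif_neg h]; ring

theorem pvFromRev (k : Int) (l : List Int) :
    from_base_k l.reverse k = pvValL k l := by
  unfold from_base_k
  induction l with
  | nil => rfl
  | cons d ds ih =>
    rw [List.reverse_cons, List.foldl_append, ih]
    simp only [List.foldl_cons, List.foldl_nil, pvValL]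
    ring

theorem pvModIdem (n k : Int) (hk : k ≠ 0) :
    PySem.Int.mod (PySem.Int.mod n k) k = PySem.Int.mod n k := by
  set r := PySem.Int.mod n k with hr
  have hb : (0 < k ∧ 0 ≤ r ∧ r < k) ∨ (k < 0 ∧ k < r ∧ r ≤ 0) := by
    rcases lt_trichotomy k 0 with h|h|h
    · right; exact ⟨h, (PySem.Int.mod_neg_bounds n h).1, (PySem.Int.mod_neg_bounds n h).2⟩
    · omega
    · left; exact ⟨h, PySem.Int.mod_nonneg n h, PySem.Int.mod_lt n h⟩
  have := (fd_unique k 0 r hk hb).2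
  simpa using this

theorem pvDigits (n k : Int) :
    ∀ d ∈ toBaseKLoop n k, PySem.Int.mod d k = d := by
  induction n using toBaseKLoop.induct (k := k) with
  | case1 n h ih =>
    rw [toBaseKLoop, dif_pos h]
    intro d hd
    rcases List.mem_cons.mp hd with rfl | hd'
    · exact pvModIdem n k (by omega)
    · exact ih d hd'
  | case2 n h =>
    rw [toBaseKLoop, dif_neg h]
    intro d hd
    simp at hd

theorem pvValL_toBase (n k : Int) :
    2 ≤ k ∧ 0 ≤ n ∨ k ≤ -2 → pvValL k (toBaseKLoop n k) = n := by
  induction n using toBaseKLoop.induct (k := k) with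
  | case1 n hg ih =>
    intro h
    rw [toBaseKLoop, dif_pos hg]
    have hrec : 2 ≤ k ∧ 0 ≤ PySem.Int.floordiv n k ∨ k ≤ -2 := by
      rcases h with ⟨hk2, hn⟩ | hk
      · left
        refine ⟨hk2, ?_⟩
        have h1 := PySem.Int.floordiv_mul_add_mod n k
        have hb1 : 0 ≤ PySem.Int.mod n k := PySem.Int.mod_nonneg n (by omega)
        have hb2 : PySem.Int.mod n k < k := PySem.Int.mod_lt n (by omega)
        by_contra hneg
        have : PySem.Int.floordiv n k * k ≤ (-1) * k :=
          mul_le_mul_of_nonneg_right (by omega) (by omega)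
        omega
      · right; exact hk
    simp only [pvValL]
    rw [ih hrec]
    have h1 := PySem.Int.floordiv_mul_add_mod n k
    have h2 : k * PySem.Int.floordiv n k = PySem.Int.floordiv n k * k := mul_comm _ _
    omega
  | case2 n hg =>
    intro h
    rw [toBaseKLoop, dif_neg hg]
    simp only [pvValL]
    omega

theorem pvValL_zeros (k : Int) (l : List Int) (p : Nat) :
    pvValL k (l ++ List.replicate p 0) = pvValL k l := by
  induction l with
  | nil =>
    simp only [List.nil_append]
    induction p with
    | zero => rfl
    | succ p ih => simp [List.replicate_succ, pvValL, ih]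
  | cons d ds ih => simp [pvValL, ih]

theorem pvValL_nonneg (k : Int) (hk : 2 ≤ k) :
    ∀ l : List Int, (∀ d ∈ l, PySem.Int.mod d k = d) → 0 ≤ pvValL k l := by
  intro l
  induction l with
  | nil => intro _; simp [pvValL]
  | cons d ds ih =>
    intro hd
    have hd0 : 0 ≤ d := by
      have h := hd d (by simp)
      rw [← h]
      exact PySem.Int.mod_nonneg d (by omega)
    have hds := ih (fun x hx => hd x (List.mem_cons_of_mem _ hx))
    simp only [pvValL]
    have := mul_nonneg (by omega : (0:Int) ≤ k) hds
    omega

-- range bound of a self-stable digit (mod d k = d)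
theorem pvDigBound (d k : Int) (hk : 2 ≤ k ∨ k ≤ -2)
    (hd : PySem.Int.mod d k = d) :
    (0 < k ∧ 0 ≤ d ∧ d < k) ∨ (k < 0 ∧ k < d ∧ d ≤ 0) := by
  rcases hk with h|h
  · left
    refine ⟨by omega, ?_, ?_⟩
    · rw [← hd]; exact PySem.Int.mod_nonneg d (by omega)
    · rw [← hd]; exact PySem.Int.mod_lt d (by omega)
  · right
    refine ⟨by omega, ?_, ?_⟩
    · rw [← hd]; exact (PySem.Int.mod_neg_bounds d (by omega)).1
    · rw [← hd]; exact (PySem.Int.mod_neg_bounds d (by omega)).2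

theorem pvG (k : Int) (hk : 2 ≤ k ∨ k ≤ -2) :
    ∀ la lb : List Int, la.length = lb.length →
    (∀ d ∈ la, PySem.Int.mod d k = d) → (∀ d ∈ lb, PySem.Int.mod d k = d) →
    pvValL k (List.zipWith (fun a b => PySem.Int.mod (a + b) k) la lb)
      = pvS (pvValL k la) (pvValL k lb) k := by
  have hk0 : k ≠ 0 := by omega
  intro la
  induction la with
  | nil =>
    intro lb hlen _ _
    have hnil : lb = [] := List.eq_nil_of_length_eq_zero (by simpa using hlen.symm)
    subst hnil
    simp only [List.zipWith_nil_right, pvValL]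
    rw [pvS, dif_neg (by simp)]
  | cons d ds ih =>
    intro lb hlen hda hdb
    cases lb with
    | nil => simp at hlen
    | cons e es =>
      have hd : PySem.Int.mod d k = d := hda d (by simp)
      have he : PySem.Int.mod e k = e := hdb e (by simp)
      have hda' : ∀ x ∈ ds, PySem.Int.mod x k = x := fun x hx => hda x (by simp [hx])
      have hdb' : ∀ x ∈ es, PySem.Int.mod x k = x := fun x hx => hdb x (by simp [hx])
      have hlen' : ds.length = es.length := by simpa using hlen
      have ihe := ih es hlen' hda' hdb'
      set a' := pvValL k ds with ha'
      set b' := pvValL k es with hb'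
      have hfa := fd_unique k a' d hk0 (pvDigBound d k hk hd)
      have hfb := fd_unique k b' e hk0 (pvDigBound e k hk he)
      have hva : pvValL k (d :: ds) = a' * k + d := by simp only [pvValL, ← ha']; ring
      have hvb : pvValL k (e :: es) = b' * k + e := by simp only [pvValL, ← hb']; ring
      rw [hva, hvb]
      simp only [List.zipWith_cons_cons, pvValL]
      rw [ihe]
      by_cases hz : a' * k + d = 0 ∧ b' * k + e = 0
      · have hd0 : d = 0 := by
          have h1 : PySem.Int.mod (a' * k + d) k = d := hfa.2
          rw [hz.1] at h1
          have h2 := (fd_zero k hk0).2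
          omega
        have ha0 : a' = 0 := by
          have := hz.1
          rcases mul_eq_zero.mp (show a' * k = 0 by omega) with h | h
          · exact h
          · exact absurd h hk0
        have he0 : e = 0 := by
          have h1 : PySem.Int.mod (b' * k + e) k = e := hfb.2
          rw [hz.2] at h1
          have h2 := (fd_zero k hk0).2
          omega
        have hb0 : b' = 0 := by
          have := hz.2
          rcases mul_eq_zero.mp (show b' * k = 0 by omega) with h | h
          · exact h
          · exact absurd h hk0
        rw [hz.1, hz.2, hd0, he0, ha0, hb0]
        rw [pvS, dif_neg (by simp)]
        simp [(fd_zero k hk0).2]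
      · have hguard : (a' * k + d ≠ 0 ∨ b' * k + e ≠ 0) ∧
            (2 ≤ k ∧ 0 ≤ a' * k + d ∧ 0 ≤ b' * k + e ∨ k ≤ -2) := by
          constructor
          · omega
          · rcases hk with hkp | hkn
            · left
              have hna := pvValL_nonneg k hkp ds hda'
              have hnb := pvValL_nonneg k hkp es hdb'
              have hd0 : 0 ≤ d := by rw [← hd]; exact PySem.Int.mod_nonneg d (by omega)
              have he0 : 0 ≤ e := by rw [← he]; exact PySem.Int.mod_nonneg e (by omega)
              have hma := mul_nonneg (show (0:Int) ≤ a' by rw [ha']; exact hna) (by omega : (0:Int) ≤ k)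
              have hmb := mul_nonneg (show (0:Int) ≤ b' by rw [hb']; exact hnb) (by omega : (0:Int) ≤ k)
              omega
            · right; exact hkn
        conv_rhs => rw [pvS]
        rw [dif_pos hguard, hfa.1, hfa.2, hfb.1, hfb.2]

def pvLsb (n k : Int) : List Int := if n = 0 then [0] else toBaseKLoop n k

theorem pv_to_base_k_eq (n k : Int) : to_base_k n k = (pvLsb n k).reverse := by
  unfold to_base_k pvLsb
  split_ifs with h <;> simp

theorem pvLsb_digits (n k : Int) (hk : k ≠ 0) :
    ∀ d ∈ pvLsb n k, PySem.Int.mod d k = d := by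
  unfold pvLsb
  split_ifs with h
  · intro d hd
    simp at hd
    subst hd
    exact (fd_zero k hk).2
  · exact pvDigits n k

theorem pvLsb_val (n k : Int) (h : 2 ≤ k ∧ 0 ≤ n ∨ k ≤ -2) :
    pvValL k (pvLsb n k) = n := by
  unfold pvLsb
  split_ifs with h0
  · simp [pvValL, h0]
  · exact pvValL_toBase n k h

-- the digit-collecting for-loop is an appending map
theorem pvFoldMap (k : Int) (l : List (Int × Int)) (acc : List Int) :
    l.foldl (fun acc p => acc ++ [PySem.Int.mod (p.1 + p.2) k]) acc
      = acc ++ l.map (fun p => PySem.Int.mod (p.1 + p.2) k) := by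
  induction l generalizing acc with
  | nil => simp
  | cons p ps ih => simp [ih]

theorem pvMapZip (k : Int) (l1 l2 : List Int) :
    (l1.zip l2).map (fun p => PySem.Int.mod (p.1 + p.2) k)
      = List.zipWith (fun a b => PySem.Int.mod (a + b) k) l1 l2 := by
  induction l1 generalizing l2 with
  | nil => simp
  | cons x xs ih =>
    cases l2 with
    | nil => simp
    | cons y ys => simp [ih]

theorem pvZipRev (f : Int → Int → Int) (l1 l2 : List Int) (h : l1.length = l2.length) :
    List.zipWith f l1.reverse l2.reverse = (List.zipWith f l1 l2).reverse := by
  induction l1 generalizing l2 with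
  | nil =>
    have : l2 = [] := List.eq_nil_of_length_eq_zero (by simpa using h.symm)
    subst this; simp
  | cons x xs ih =>
    cases l2 with
    | nil => simp at h
    | cons y ys =>
      have h' : xs.length = ys.length := by simpa using h
      simp only [List.reverse_cons, List.zipWith_cons_cons]
      rw [List.zipWith_append (by simp [h']), ih ys h']
      simp

theorem pvA_eq (A B k : Int) (h : 2 ≤ k ∧ 0 ≤ A ∧ 0 ≤ B ∨ k ≤ -2) :
    no_carry_add A B k = pvS A B k := by
  have hk0 : k ≠ 0 := by omega
  have hk2 : 2 ≤ k ∨ k ≤ -2 := by omega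
  have hcA : 2 ≤ k ∧ 0 ≤ A ∨ k ≤ -2 := by omega
  have hcB : 2 ≤ k ∧ 0 ≤ B ∨ k ≤ -2 := by omega
  simp only [no_carry_add, pv_to_base_k_eq, List.length_reverse]
  set la := pvLsb A k with hla
  set lb := pvLsb B k with hlb
  set m := max la.length lb.length with hm
  set pa := m - la.length with hpa
  set pb := m - lb.length with hpb
  have hlena : la.length + pa = m := by
    have : la.length ≤ m := le_max_left _ _
    omega
  have hlenb : lb.length + pb = m := by
    have : lb.length ≤ m := le_max_right _ _
    omega
  rw [pvFoldMap, List.nil_append, pvMapZip]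
  -- (pvMapZip instantiated at the concrete mod function)
  have hrepa : List.replicate pa (0:Int) ++ la.reverse = (la ++ List.replicate pa 0).reverse := by
    simp [List.reverse_append]
  have hrepb : List.replicate pb (0:Int) ++ lb.reverse = (lb ++ List.replicate pb 0).reverse := by
    simp [List.reverse_append]
  rw [hrepa, hrepb]
  rw [pvZipRev _ _ _ (by simp; omega)]
  rw [pvFromRev]
  have hdiga : ∀ d ∈ la ++ List.replicate pa (0:Int), PySem.Int.mod d k = d := by
    intro d hd
    rcases List.mem_append.mp hd with h1 | h1
    · exact pvLsb_digits A k hk0 d h1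
    · have : d = 0 := List.eq_of_mem_replicate h1
      subst this
      exact (fd_zero k hk0).2
  have hdigb : ∀ d ∈ lb ++ List.replicate pb (0:Int), PySem.Int.mod d k = d := by
    intro d hd
    rcases List.mem_append.mp hd with h1 | h1
    · exact pvLsb_digits B k hk0 d h1
    · have : d = 0 := List.eq_of_mem_replicate h1
      subst this
      exact (fd_zero k hk0).2
  rw [pvG k hk2 _ _ (by simp; omega) hdiga hdigb]
  rw [pvValL_zeros, pvValL_zeros, hla, hlb, pvLsb_val A k hcA, pvLsb_val B k hcB]

-- ===== VERDICT (by name: the statement is the Claim_ definition above) =====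
theorem no_carry_add_spec : Claim_equal_no_carry_add := by
  intro A B k hdom hpre
  unfold Spec_no_carry_add no_carry_add_alt
  rw [pvAlt_eq]
  rcases hpre with h | h | ⟨hA, hB, hk⟩
  · rw [pvA_eq A B k (Or.inl h)]; ring
  · rw [pvA_eq A B k (Or.inr h)]; ring
  · subst hA; subst hB
    rw [pvS, dif_neg (by simp)]
    have hz := (fd_zero k hk).2
    simp [no_carry_add, to_base_k, from_base_k, hz]
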